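-- pv_equiv track=rewrite | github.com/MrBrantCode/unitest_baseline | mut_generate/mist_train_cf/cf_99599/solution.py | most_influential_pioneer
-- ===== SOURCE A (Python) =====
-- def most_influential_pioneer(pioneers):
--     contributions = {}
--     for pioneer, contribution in pioneers:
--         if contribution in contributions:
--             contributions[contribution].append(pioneer)
--         else:
--             contributions[contribution] = [pioneer]
--     max_contribution = max(contributions.keys(), key=lambda x: len(contributions[x]))
--     return contributions[max_contribution][0]
-- ===== SOURCE B (Python) =====
-- def most_influential_pioneer(pioneers):
--     counts = {}
--     for _, contribution in pioneers:
--         counts[contribution] = counts.get(contribution, 0) + 1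
--     winner = max(counts, key=lambda c: counts[c])
--     for pioneer, contribution in pioneers:
--         if contribution == winner:
--             return pioneer
-- ===== Notes on version B (the rewrite author's own statement) =====
-- stated objective: idiomatic
-- what changed: B keeps only a count per contribution value instead of grouping full pioneer lists, picks the winning value with max over the counts, and re-scans the input for the first pioneer with that value (two-pass counts + scan instead of one-pass grouping dict).
import Mathlib
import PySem

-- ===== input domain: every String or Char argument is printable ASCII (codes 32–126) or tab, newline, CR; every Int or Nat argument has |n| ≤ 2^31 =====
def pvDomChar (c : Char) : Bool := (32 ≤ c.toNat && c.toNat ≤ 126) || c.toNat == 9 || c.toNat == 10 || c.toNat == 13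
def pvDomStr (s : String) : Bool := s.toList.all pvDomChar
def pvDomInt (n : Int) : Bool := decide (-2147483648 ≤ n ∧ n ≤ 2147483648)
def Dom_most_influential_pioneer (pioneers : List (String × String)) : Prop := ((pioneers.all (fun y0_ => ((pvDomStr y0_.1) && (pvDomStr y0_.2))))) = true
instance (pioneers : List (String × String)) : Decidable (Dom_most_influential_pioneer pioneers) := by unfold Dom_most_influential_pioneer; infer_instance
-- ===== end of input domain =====

-- B replaces A's dict of grouped pioneer lists by a plain count per contribution value
-- plus a second forward scan for the first pioneer with the winning value (idiomatic two-pass shape).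

-- ===== PORT A =====
def most_influential_pioneer (pioneers : List (String × String)) : String :=
  let contributions : PySem.Dict String (List String) :=
    pioneers.foldl (fun d p =>
      if d.contains p.2 then d.modify p.2 [] (fun l => l ++ [p.1])
      else d.insert p.2 [p.1]) PySem.Dict.empty
  match PySem.List.max? contributions.keys (fun x => (contributions.getD x []).length) with
  | none => ""     -- Python raises ValueError here (empty input); excluded by Pre_
  | some maxContribution =>
    match PySem.List.pyGet? (contributions.getD maxContribution []) 0 with
    | some s => s
    | none => ""   -- unreachable: the group of a key present in the dict is nonempty

-- ===== PORT B =====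
def most_influential_pioneer_alt (pioneers : List (String × String)) : String :=
  let counts : PySem.Dict String Int :=
    pioneers.foldl (fun d p => d.insert p.2 (d.getD p.2 0 + 1)) PySem.Dict.empty
  match PySem.List.max? counts.keys (fun c => counts.getD c 0) with
  | none => ""     -- Python raises ValueError here (empty input); excluded by Pre_
  | some winner =>
    match pioneers.find? (fun p => p.2 == winner) with
    | some p => p.1
    | none => ""   -- unreachable: winner is some pioneer's contribution

-- ===== PRECONDITION & SPEC =====
-- Pre_ excludes only the empty list, on which Python's max() raises ValueError in both A and B.
def Pre_most_influential_pioneer (pioneers : List (String × String)) : Prop := pioneers ≠ []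
instance (pioneers : List (String × String)) : Decidable (Pre_most_influential_pioneer pioneers) := by unfold Pre_most_influential_pioneer; infer_instance
def pvWitness_most_influential_pioneer : (List (String × String)) := ([("ada", "logic")])

def Spec_most_influential_pioneer (pioneers : List (String × String)) (out : String) : Prop := out = most_influential_pioneer_alt pioneers
instance (pioneers : List (String × String)) (out : String) : Decidable (Spec_most_influential_pioneer pioneers out) := by unfold Spec_most_influential_pioneer; infer_instance

-- ===== CLAIM (what is proved, stated in full; the proofs are below) =====
def Claim_equal_most_influential_pioneer : Prop := ∀ (pioneers : List (String × String)), Dom_most_influential_pioneer pioneers → Pre_most_influential_pioneer pioneers → Spec_most_influential_pioneer pioneers (most_influential_pioneer pioneers)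

-- ===== LEMMAS AND PROOFS =====

-- the two max?-folds agree when the Int key is the cast of the Nat key
theorem pv_max_fold_congr {α : Type} (f : α → Nat) (g : α → Int)
    (h : ∀ a, g a = (f a : Int)) (xs : List α) (acc : Option α) :
    xs.foldl (fun acc x => match acc with
      | none => some x
      | some m => if f m < f x then some x else some m) acc
  = xs.foldl (fun acc x => match acc with
      | none => some x
      | some m => if g m < g x then some x else some m) acc := by
  induction xs generalizing acc with
  | nil => rfl
  | cons y ys ih =>
    simp only [List.foldl_cons]
    cases acc with
    | none => exact ih _
    | some m =>
      have hif : (if f m < f y then some y else some m) = (if g m < g y then some y else some m) := by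
        simp [h]
      show List.foldl _ (if f m < f y then some y else some m) ys
         = List.foldl _ (if g m < g y then some y else some m) ys
      rw [hif]; exact ih _

-- A's grouping fold, keyed by the second component, characterised pointwise
theorem pv_groupA_getD (pioneers : List (String × String)) (c : String) :
    (pioneers.foldl (fun d p =>
      if d.contains p.2 then d.modify p.2 [] (fun l => l ++ [p.1])
      else d.insert p.2 [p.1]) (PySem.Dict.empty : PySem.Dict String (List String))).getD c []
    = (pioneers.filter (fun p => p.2 == c)).map (fun p => p.1) := by
  have hstep : (fun (d : PySem.Dict String (List String)) (p : String × String) =>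
      if d.contains p.2 then d.modify p.2 [] (fun l => l ++ [p.1])
      else d.insert p.2 [p.1])
    = fun d p => d.modify p.2 [] (fun l => l ++ [p.1]) := by
    funext d p
    by_cases hc : d.contains p.2
    · simp [hc]
    · simp only [hc, Bool.false_eq_true, if_false]
      show d.insert p.2 [p.1] = d.insert p.2 ((d.getD p.2 []) ++ [p.1])
      rw [PySem.Dict.getD_of_not_contains]
      · simp
      · simp only [Bool.not_eq_true] at hc
        exact hc
  rw [hstep]
  have hmap : pioneers.foldl (fun (d : PySem.Dict String (List String)) p => d.modify p.2 [] (fun l => l ++ [p.1])) PySem.Dict.empty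
      = (pioneers.map Prod.swap).foldl (fun d p => d.modify p.1 [] (fun l => l ++ [p.2])) PySem.Dict.empty := by
    rw [List.foldl_map]; rfl
  rw [hmap, PySem.Dict.getD_foldl_modify_append]
  simp [List.filter_map, Function.comp_def]


-- B's counting fold characterised pointwise
theorem pv_countB_getD (pioneers : List (String × String)) (c : String) :
    (pioneers.foldl (fun d p => d.insert p.2 (d.getD p.2 0 + 1)) (PySem.Dict.empty : PySem.Dict String Int)).getD c 0
    = ((pioneers.filter (fun p => p.2 == c)).length : Int) := by
  have hmap : pioneers.foldl (fun (d : PySem.Dict String Int) p => d.insert p.2 (d.getD p.2 0 + 1)) PySem.Dict.empty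
      = (pioneers.map (fun p => p.2)).foldl (fun d x => d.insert x (d.getD x 0 + 1)) PySem.Dict.empty := by
    rw [List.foldl_map]
  rw [hmap, PySem.Dict.getD_foldl_insert_add_one]
  simp [List.count_eq_countP, List.countP_eq_length_filter, List.filter_map, Function.comp_def]

-- the two dicts have the same key list
theorem pv_keys_eq (pioneers : List (String × String)) :
    (pioneers.foldl (fun d p =>
      if d.contains p.2 then d.modify p.2 [] (fun l => l ++ [p.1])
      else d.insert p.2 [p.1]) (PySem.Dict.empty : PySem.Dict String (List String))).keys
    = (pioneers.foldl (fun d p => d.insert p.2 (d.getD p.2 0 + 1)) (PySem.Dict.empty : PySem.Dict String Int)).keys := by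
  have hstep : (fun (d : PySem.Dict String (List String)) (p : String × String) =>
      if d.contains p.2 then d.modify p.2 [] (fun l => l ++ [p.1])
      else d.insert p.2 [p.1])
    = fun d p => d.modify p.2 [] (fun l => l ++ [p.1]) := by
    funext d p
    by_cases hc : d.contains p.2
    · simp [hc]
    · simp only [hc, Bool.false_eq_true, if_false]
      show d.insert p.2 [p.1] = d.insert p.2 ((d.getD p.2 []) ++ [p.1])
      rw [PySem.Dict.getD_of_not_contains]
      · simp
      · simp only [Bool.not_eq_true] at hc
        exact hc
  rw [hstep]
  rw [PySem.Dict.keys_foldl_modify_key pioneers (fun p => p.2) [] (fun d p l => l ++ [p.1])]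
  rw [PySem.Dict.keys_foldl_insert_key pioneers (fun p => p.2) (fun d p => d.getD p.2 0 + 1)]
  rfl


-- ===== VERDICT (by name: the statement is the Claim_ definition above) =====
theorem most_influential_pioneer_spec : Claim_equal_most_influential_pioneer := by
  intro pioneers _ _
  unfold Spec_most_influential_pioneer most_influential_pioneer most_influential_pioneer_alt
  simp only []
  have hkeys := pv_keys_eq pioneers
  set G := pioneers.foldl (fun d p =>
      if d.contains p.2 then d.modify p.2 [] (fun l => l ++ [p.1])
      else d.insert p.2 [p.1]) (PySem.Dict.empty : PySem.Dict String (List String)) with hG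
  set C := pioneers.foldl (fun d p => d.insert p.2 (d.getD p.2 0 + 1)) (PySem.Dict.empty : PySem.Dict String Int) with hC
  have hmax : PySem.List.max? G.keys (fun x => (G.getD x []).length)
      = PySem.List.max? C.keys (fun c => C.getD c 0) := by
    rw [hkeys]
    unfold PySem.List.max?
    apply pv_max_fold_congr
    intro a
    rw [pv_countB_getD, pv_groupA_getD]
    simp
  rw [hmax]
  cases hm : PySem.List.max? C.keys (fun c => C.getD c 0) with
  | none => rfl
  | some w =>
    have hgrp := pv_groupA_getD pioneers w
    rw [← hG] at hgrp
    simp only [hgrp, ← List.head?_filter]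
    cases hl : pioneers.filter (fun p => p.2 == w) with
    | nil => simp [PySem.List.pyGet?, PySem.List.pyIdx?]
    | cons a t => simp [PySem.List.pyGet?, PySem.List.pyIdx?]
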